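-- pv_equiv track=rewrite | github.com/natemurthy/misc | toy-problems/fbrecruiting/search.py | getMilestoneDays
-- ===== SOURCE A (Python) =====
-- def getMilestoneDays(revenues, milestones):
--
--     days = []
--     for m in milestones:
--         total_revenue = 0
--         for ix, r in enumerate(revenues):
--             total_revenue += r
--             if total_revenue >= m:
--                 days.append(ix+1)
--                 break
--     return days
-- ===== SOURCE B (Python) =====
-- def getMilestoneDays(revenues, milestones):
--     # running maximum of prefix sums is nondecreasing, so the first day a
--     # milestone is reached can be found by binary search even when some
--     # revenues are negative
--     maxpref = []
--     total = 0
--     for r in revenues: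
--         total += r
--         if maxpref and maxpref[-1] > total:
--             maxpref.append(maxpref[-1])
--         else:
--             maxpref.append(total)
--     n = len(maxpref)
--     days = []
--     for m in milestones:
--         lo, hi = 0, n
--         while lo < hi:
--             mid = (lo + hi) // 2
--             if maxpref[mid] < m:
--                 lo = mid + 1
--             else:
--                 hi = mid
--         if lo < n:
--             days.append(lo + 1)
--     return days
-- ===== Notes on version B (the rewrite author's own statement) =====
-- stated objective: faster
-- what changed: A rescans revenues from day one for every milestone; B precomputes the running maximum of prefix sums once (monotone even with negative revenues) and finds each milestone's first day by a hand-written binary search on it.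
import Mathlib
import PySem

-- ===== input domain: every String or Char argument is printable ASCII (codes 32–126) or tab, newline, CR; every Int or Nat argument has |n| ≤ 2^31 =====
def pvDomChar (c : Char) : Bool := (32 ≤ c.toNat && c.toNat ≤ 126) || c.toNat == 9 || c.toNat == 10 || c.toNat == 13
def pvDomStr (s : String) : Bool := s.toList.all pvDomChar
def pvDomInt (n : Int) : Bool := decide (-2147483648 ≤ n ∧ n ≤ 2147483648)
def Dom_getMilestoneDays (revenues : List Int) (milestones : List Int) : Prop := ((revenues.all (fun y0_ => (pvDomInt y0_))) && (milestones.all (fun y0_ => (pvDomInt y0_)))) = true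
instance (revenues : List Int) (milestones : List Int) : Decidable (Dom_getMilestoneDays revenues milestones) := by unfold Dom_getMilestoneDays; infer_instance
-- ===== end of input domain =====

-- B replaces A's per-milestone rescan of revenues by a precomputed running
-- maximum of prefix sums plus a binary search per milestone (alternative algorithm).

-- ===== PORT A =====
-- inner 'for ix, r in enumerate(revenues): total += r; if total >= m: append(ix+1); break'
def pvInnerA (pairs : List (Int × Int)) (total : Int) (m : Int) : Option Int :=
  match pairs with
  | [] => none
  | (ix, r) :: rest =>
    let total := total + r
    if m ≤ total then some (ix + 1) else pvInnerA rest total m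

def getMilestoneDays (revenues : List Int) (milestones : List Int) : List Int :=
  milestones.foldl (fun days m =>
    match pvInnerA (PySem.List.enumerate revenues) 0 m with
    | some d => days ++ [d]
    | none => days) []

-- ===== PORT B =====
-- first loop of Source B: builds maxpref (running maximum of prefix sums)
def pvLoopB (revs : List Int) (total : Int) (mp : List Int) : List Int :=
  match revs with
  | [] => mp
  | r :: rest =>
    let total := total + r
    match mp.getLast? with
    | some b => if b > total then pvLoopB rest total (mp ++ [b]) else pvLoopB rest total (mp ++ [total])
    | none => pvLoopB rest total (mp ++ [total])

-- Source B's hand-written bisect_left loop; maxpref[mid] ported as getD (mid < hi ≤ length)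
def pvBisect (a : List Int) (x : Int) (lo hi : Nat) : Nat :=
  if lo < hi then
    let mid := (lo + hi) / 2
    if a.getD mid 0 < x then pvBisect a x (mid + 1) hi else pvBisect a x lo mid
  else lo
termination_by hi - lo
decreasing_by all_goals omega

def getMilestoneDays_alt (revenues : List Int) (milestones : List Int) : List Int :=
  let maxpref := pvLoopB revenues 0 []
  let n := maxpref.length
  milestones.foldl (fun days m =>
    let res := pvBisect maxpref m 0 n
    if res < n then days ++ [(res : Int) + 1] else days) []

-- ===== PRECONDITION & SPEC =====
def Spec_getMilestoneDays (revenues : List Int) (milestones : List Int) (out : List Int) : Prop := out = getMilestoneDays_alt revenues milestones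
instance (revenues : List Int) (milestones : List Int) (out : List Int) : Decidable (Spec_getMilestoneDays revenues milestones out) := by unfold Spec_getMilestoneDays; infer_instance

-- ===== CLAIM (what is proved, stated in full; the proofs are below) =====
def Claim_equal_getMilestoneDays : Prop := ∀ (revenues : List Int) (milestones : List Int), Dom_getMilestoneDays revenues milestones → Spec_getMilestoneDays revenues milestones (getMilestoneDays revenues milestones)

-- ===== LEMMAS AND PROOFS =====

-- reference version of maxpref: running max with explicit 'best' accumulator
def mref (total best : Int) (revs : List Int) : List Int :=
  match revs with
  | [] => []
  | r :: rest =>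
    let t := total + r
    let b := max best t
    b :: mref t b rest

-- first 0-based index at which the running total reaches m; = length if never
def fd (revs : List Int) (total m : Int) : Nat :=
  match revs with
  | [] => 0
  | r :: rest =>
    let t := total + r
    if m ≤ t then 0 else fd rest t m + 1

theorem fd_le_length (revs : List Int) (total m : Int) : fd revs total m ≤ revs.length := by
  induction revs generalizing total with
  | nil => simp [fd]
  | cons r rest ih =>
    simp only [fd, List.length_cons]
    split
    · omega
    · have := ih (total + r); omega

theorem innerA_eq_fd (revs : List Int) (s total m : Int) :
    pvInnerA (PySem.List.enumerate revs s) total m =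
      if fd revs total m < revs.length then some (s + (fd revs total m : Int) + 1) else none := by
  induction revs generalizing s total with
  | nil => simp [pvInnerA, fd, PySem.List.enumerate_nil]
  | cons r rest ih =>
    rw [PySem.List.enumerate_cons]
    simp only [pvInnerA, fd]
    split
    · simp
    · rw [ih (s + 1) (total + r)]
      have h := fd_le_length rest (total + r) m
      split <;> split <;> simp_all <;> omega

theorem mref_length (total best : Int) (revs : List Int) :
    (mref total best revs).length = revs.length := by
  induction revs generalizing total best with
  | nil => simp [mref]
  | cons r rest ih => simp [mref, ih]

theorem mref_mem_le (total best : Int) (revs : List Int) :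
    ∀ x ∈ mref total best revs, best ≤ x := by
  induction revs generalizing total best with
  | nil => simp [mref]
  | cons r rest ih =>
    intro x hx
    simp only [mref, List.mem_cons] at hx
    rcases hx with h | h
    · subst h; exact le_max_left _ _
    · exact le_trans (le_max_left _ _) (ih _ _ _ h)

theorem mref_sorted (total best : Int) (revs : List Int) :
    (mref total best revs).Pairwise (· ≤ ·) := by
  induction revs generalizing total best with
  | nil => simp [mref]
  | cons r rest ih =>
    simp only [mref, List.pairwise_cons]
    exact ⟨fun x hx => mref_mem_le _ _ _ x hx, ih _ _⟩

-- pvLoopB with nonempty accumulator path equals mref appended, where b = last of mp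
theorem loopB_some (revs : List Int) (total : Int) (mp : List Int) (b : Int)
    (h : mp.getLast? = some b) :
    pvLoopB revs total mp = mp ++ mref total b revs := by
  induction revs generalizing total mp b with
  | nil => simp [pvLoopB, mref]
  | cons r rest ih =>
    simp only [pvLoopB, mref, h]
    have hmax : (mp ++ [max b (total + r)]).getLast? = some (max b (total + r)) := by
      simp
    split
    · rename_i hgt
      have : max b (total + r) = b := by omega
      rw [ih (total + r) (mp ++ [b]) b (by simpa [this] using hmax)]
      simp [this]
    · rename_i hle
      have : max b (total + r) = total + r := by omega
      rw [ih (total + r) (mp ++ [total + r]) (total + r) (by simpa [this] using hmax)]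
      simp [this]

theorem loopB_none (revs : List Int) (total : Int) :
    pvLoopB revs total [] = mref total (match revs with | [] => 0 | r :: _ => total + r) revs := by
  cases revs with
  | nil => simp [pvLoopB, mref]
  | cons r rest =>
    simp only [pvLoopB, mref, List.getLast?_nil, List.nil_append]
    rw [loopB_some rest (total + r) [total + r] (total + r) (by simp)]
    simp [max_self]

-- findIdx on the running max agrees with fd (first prefix ≥ m), given best < m
theorem findIdx_mref (revs : List Int) (total best m : Int) (hb : best < m) :
    (mref total best revs).findIdx (fun v => decide (m ≤ v)) = fd revs total m := by
  induction revs generalizing total best with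
  | nil => simp [mref, fd]
  | cons r rest ih =>
    simp only [mref, fd, List.findIdx_cons]
    by_cases h : m ≤ total + r
    · have : m ≤ max best (total + r) := le_trans h (le_max_right _ _)
      simp [h, this]
    · have hb' : max best (total + r) < m := by omega
      have : ¬ m ≤ max best (total + r) := by omega
      simp only [this, decide_false, cond_false, h, if_false]
      rw [ih _ _ hb']

theorem findIdx_loopB (revs : List Int) (m : Int) :
    (pvLoopB revs 0 []).findIdx (fun v => decide (m ≤ v)) = fd revs 0 m := by
  rw [loopB_none]
  cases revs with
  | nil => simp [mref, fd]
  | cons r rest =>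
    simp only [mref, fd, List.findIdx_cons, max_self, zero_add]
    by_cases h : m ≤ r
    · simp [h]
    · have hb : r < m := by omega
      simp only [h, decide_false, cond_false, if_false]
      rw [findIdx_mref rest r r m hb]

-- uniqueness: any k with the 'first index with a[k] ≥ x' properties equals findIdx
theorem findIdx_char (a : List Int) (x : Int) (k : Nat)
    (hk : k ≤ a.length)
    (hlt : ∀ j, j < k → a.getD j 0 < x)
    (hge : k < a.length → x ≤ a.getD k 0) :
    a.findIdx (fun v => decide (x ≤ v)) = k := by
  induction a generalizing k with
  | nil => simp only [List.findIdx_nil]; simp at hk; omega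
  | cons v rest ih =>
    simp only [List.findIdx_cons]
    by_cases hv : x ≤ v
    · have hk0 : k = 0 := by
        by_contra h
        have := hlt 0 (by omega)
        simp [List.getD] at this
        omega
      simp [hv, hk0]
    · have hk0 : k ≠ 0 := by
        intro h
        subst h
        have := hge (by simp)
        simp [List.getD] at this
        omega
      obtain ⟨k', rfl⟩ : ∃ k', k = k' + 1 := ⟨k - 1, by omega⟩
      simp only [hv, decide_false, cond_false]
      rw [ih k' (by simp at hk; omega)
        (fun j hj => by have := hlt (j + 1) (by omega); simpa [List.getD] using this)
        (fun h => by have := hge (by simp; omega); simpa [List.getD] using this)]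

theorem sorted_getD (a : List Int) (hs : a.Pairwise (· ≤ ·)) (i j : Nat)
    (hij : i ≤ j) (hj : j < a.length) : a.getD i 0 ≤ a.getD j 0 := by
  rcases eq_or_lt_of_le hij with rfl | hlt
  · exact le_refl _
  · rw [List.pairwise_iff_getElem] at hs
    have := hs i j (by omega) hj hlt
    rw [List.getD_eq_getElem a 0 (by omega), List.getD_eq_getElem a 0 hj]
    exact this

-- bisect invariant: result is the first index with a[res] ≥ x
theorem bisect_char (a : List Int) (x : Int) (hs : a.Pairwise (· ≤ ·)) :
    ∀ lo hi, lo ≤ hi → hi ≤ a.length →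
    (∀ j, j < lo → a.getD j 0 < x) →
    (∀ j, hi ≤ j → j < a.length → x ≤ a.getD j 0) →
    (pvBisect a x lo hi ≤ a.length ∧
     (∀ j, j < pvBisect a x lo hi → a.getD j 0 < x) ∧
     (pvBisect a x lo hi < a.length → x ≤ a.getD (pvBisect a x lo hi) 0)) := by
  intro lo hi
  induction hlh : hi - lo using Nat.strong_induction_on generalizing lo hi with
  | _ d ih =>
    intro hle hhi hlt hge
    rw [pvBisect]
    by_cases h : lo < hi
    · simp only [h, if_true]
      by_cases hm : a.getD ((lo + hi) / 2) 0 < x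
      · simp only [hm, if_true]
        exact ih (hi - ((lo + hi) / 2 + 1)) (by omega) _ _ rfl (by omega) hhi
          (fun j hj => by
            by_cases hjl : j < lo
            · exact hlt j hjl
            · exact lt_of_le_of_lt (sorted_getD a hs j ((lo + hi) / 2) (by omega) (by omega)) hm)
          hge
      · simp only [hm, if_false]
        rw [not_lt] at hm
        exact ih (((lo + hi) / 2) - lo) (by omega) _ _ rfl (by omega) (by omega) hlt
          (fun j hj hjn => le_trans hm (sorted_getD a hs ((lo + hi) / 2) j hj hjn))
    · simp only [h, if_false]
      have : lo = hi := by omega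
      subst this
      exact ⟨by omega, hlt, fun hln => hge lo (le_refl _) hln⟩

theorem bisect_eq_findIdx (a : List Int) (x : Int) (hs : a.Pairwise (· ≤ ·)) :
    pvBisect a x 0 a.length = a.findIdx (fun v => decide (x ≤ v)) := by
  obtain ⟨h1, h2, h3⟩ := bisect_char a x hs 0 a.length (by omega) (le_refl _)
    (by omega) (by omega)
  exact (findIdx_char a x _ h1 h2 h3).symm

theorem loopB_length (revs : List Int) : (pvLoopB revs 0 []).length = revs.length := by
  rw [loopB_none]
  cases revs <;> simp [mref_length]

theorem loopB_sorted (revs : List Int) : (pvLoopB revs 0 []).Pairwise (· ≤ ·) := by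
  rw [loopB_none]
  cases revs <;> exact mref_sorted _ _ _

-- ===== VERDICT (by name: the statement is the Claim_ definition above) =====
theorem getMilestoneDays_spec : Claim_equal_getMilestoneDays := by
  intro revenues milestones _
  unfold Spec_getMilestoneDays getMilestoneDays getMilestoneDays_alt
  apply PySem.List.foldl_congr_mem
  intro days m _
  rw [innerA_eq_fd revenues 0 0 m,
    bisect_eq_findIdx _ m (loopB_sorted revenues), findIdx_loopB, loopB_length]
  by_cases hlt : fd revenues 0 m < revenues.length
  · simp [hlt]
  · simp [hlt]
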